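-- pv_equiv track=rewrite | github.com/Jabed-A1/bug-bounty-2 | app/services/auth_detector.py | _calculate_auth_confidence
-- ===== SOURCE A (Python) =====
-- def _calculate_auth_confidence(status_codes: list, is_authenticated: bool) -> int:
--     """
--     Calculate confidence in auth detection
--     """
--     if is_authenticated is None:
--         return 0
--
--     if not status_codes:
--         return 0
--
--     # High confidence for 401/403
--     if any(code in {401, 403} for code in status_codes):
--         return 90
--
--     # Medium confidence for redirects
--     if any(code in {302, 303, 307} for code in status_codes):
--         return 60
--
--     # Low confidence for 200
--     if all(code == 200 for code in status_codes):
--         return 30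
--
--     return 50
-- ===== SOURCE B (Python) =====
-- _RANK = {401: 3, 403: 3, 302: 2, 303: 2, 307: 2, 200: 0}
-- _SCORE = (30, 50, 60, 90)
--
-- def _calculate_auth_confidence(status_codes: list, is_authenticated: bool) -> int:
--     """Map each code to a severity rank, take the max rank, index a score table."""
--     if is_authenticated is None:
--         return 0
--     if not status_codes:
--         return 0
--     return _SCORE[max(_RANK.get(code, 1) for code in status_codes)]
-- ===== Notes on version B (the rewrite author's own statement) =====
-- stated objective: alternative
-- what changed: Replaces the priority chain of any/any/all scans by mapping each code to a numeric severity rank (dict lookup, unknown=1), taking the maximum rank in one pass, and indexing a score table (30,50,60,90) with it.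
import Mathlib
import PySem

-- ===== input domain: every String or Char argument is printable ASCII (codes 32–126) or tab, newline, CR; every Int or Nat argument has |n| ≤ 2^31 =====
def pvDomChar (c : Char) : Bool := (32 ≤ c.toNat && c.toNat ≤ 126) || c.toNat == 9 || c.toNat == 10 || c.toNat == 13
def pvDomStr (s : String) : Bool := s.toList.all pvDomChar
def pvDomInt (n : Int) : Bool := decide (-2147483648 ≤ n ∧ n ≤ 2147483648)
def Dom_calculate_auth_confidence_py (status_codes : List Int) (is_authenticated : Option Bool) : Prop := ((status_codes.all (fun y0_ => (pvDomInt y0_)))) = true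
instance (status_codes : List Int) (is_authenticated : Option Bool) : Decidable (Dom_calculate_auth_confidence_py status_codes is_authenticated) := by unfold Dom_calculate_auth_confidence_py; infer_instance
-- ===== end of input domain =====

-- B replaces A's any/any/all priority chain by rank-per-code + max + score table; return-value equivalence proved.


-- ===== PORT A =====
def calculate_auth_confidence_py (status_codes : List Int) (is_authenticated : Option Bool) : Int :=
  if is_authenticated = none then 0
  else if status_codes = [] then 0
  else if status_codes.any (fun code => code = 401 || code = 403) then 90
  else if status_codes.any (fun code => code = 302 || code = 303 || code = 307) then 60
  else if status_codes.all (fun code => code = 200) then 30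
  else 50

-- ===== PORT B =====
-- _RANK.get(code, 1): the constant dict lookup ported as a function table (exact)
def pvRank (c : Int) : Int :=
  if c = 401 then 3 else if c = 403 then 3
  else if c = 302 then 2 else if c = 303 then 2 else if c = 307 then 2
  else if c = 200 then 0 else 1

-- _SCORE[r]: tuple indexing, r is always 0..3 here (exact on those values)
def pvScore (r : Int) : Int :=
  if r = 0 then 30 else if r = 1 then 50 else if r = 2 then 60 else 90

def calculate_auth_confidence_py_alt (status_codes : List Int) (is_authenticated : Option Bool) : Int :=
  if is_authenticated = none then 0
  else
    match status_codes with
    | [] => 0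
    | h :: t => pvScore (t.foldl (fun m c => max m (pvRank c)) (pvRank h))  -- max(generator): first element seeds the running max

-- ===== PRECONDITION & SPEC =====
def Spec_calculate_auth_confidence_py (status_codes : List Int) (is_authenticated : Option Bool) (out : Int) : Prop := out = calculate_auth_confidence_py_alt status_codes is_authenticated
instance (status_codes : List Int) (is_authenticated : Option Bool) (out : Int) : Decidable (Spec_calculate_auth_confidence_py status_codes is_authenticated out) := by unfold Spec_calculate_auth_confidence_py; infer_instance

-- ===== CLAIM =====
def Claim_equal_calculate_auth_confidence_py : Prop := ∀ (status_codes : List Int) (is_authenticated : Option Bool), Dom_calculate_auth_confidence_py status_codes is_authenticated → Spec_calculate_auth_confidence_py status_codes is_authenticated (calculate_auth_confidence_py status_codes is_authenticated)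

-- ===== LEMMAS AND PROOFS =====

-- the maximum rank of a list, expressed through A's three conditions
def pvM (xs : List Int) : Int :=
  if xs.any (fun code => code = 401 || code = 403) then 3
  else if xs.any (fun code => code = 302 || code = 303 || code = 307) then 2
  else if xs.all (fun code => code = 200) then 0
  else 1

theorem pvM_cons (x : Int) (xs : List Int) : pvM (x :: xs) = max (pvRank x) (pvM xs) := by
  simp only [pvM, pvRank, List.any_cons, List.all_cons]
  split_ifs <;> simp_all

theorem pvFoldMax (xs : List Int) (a : Int) (ha : 0 ≤ a) :
    xs.foldl (fun m c => max m (pvRank c)) a = max a (pvM xs) := by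
  induction xs generalizing a with
  | nil => simp [pvM]; exact ha
  | cons x xs ih =>
    rw [List.foldl_cons, ih (max a (pvRank x)) (le_trans ha (le_max_left _ _)), pvM_cons]
    omega

theorem pvRank_nonneg (c : Int) : 0 ≤ pvRank c := by
  simp only [pvRank]; split_ifs <;> omega

-- ===== VERDICT =====
theorem calculate_auth_confidence_py_spec : Claim_equal_calculate_auth_confidence_py := by
  intro xs auth _
  unfold Spec_calculate_auth_confidence_py calculate_auth_confidence_py calculate_auth_confidence_py_alt
  by_cases hauth : auth = none
  · simp [hauth]
  · cases xs with
    | nil => simp [hauth]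
    | cons h t =>
      simp only [hauth, reduceCtorEq, if_false]
      rw [pvFoldMax t (pvRank h) (pvRank_nonneg h)]
      have hM : max (pvRank h) (pvM t) = pvM (h :: t) := (pvM_cons h t).symm
      rw [hM]
      simp only [pvM, pvScore]
      split_ifs <;> simp_all
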